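-- pv_equiv track=rewrite | github.com/satymbaevtimur/CodeWars | Python/6-kyu/How much hex is the fish.py | fish_hex
-- ===== SOURCE A (Python) =====
-- def fish_hex(name):
--     hex_values = {
--         'a': 10,
--         'b': 11,
--         'c': 12,
--         'd': 13,
--         'e': 14,
--         'f': 15
--     }
--
--     result = 0
--
--     for char in name.lower():
--         if char in hex_values:
--             result ^= hex_values[char]
--
--     return result
-- ===== SOURCE B (Python) =====
-- def fish_hex(name):
--     counts = {}
--     for ch in name.lower():
--         counts[ch] = counts.get(ch, 0) + 1
--     result = 0
--     for letter, value in (('a', 10), ('b', 11), ('c', 12), ('d', 13), ('e', 14), ('f', 15)):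
--         if counts.get(letter, 0) % 2 == 1:
--             result ^= value
--     return result
-- ===== Notes on version B (the rewrite author's own statement) =====
-- stated objective: alternative
-- what changed: B builds a character-frequency dict in one pass and then XORs each of the six fixed hex values in only when its letter's count is odd (XOR self-cancellation), instead of XOR-ing per character of the string.
import Mathlib
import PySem

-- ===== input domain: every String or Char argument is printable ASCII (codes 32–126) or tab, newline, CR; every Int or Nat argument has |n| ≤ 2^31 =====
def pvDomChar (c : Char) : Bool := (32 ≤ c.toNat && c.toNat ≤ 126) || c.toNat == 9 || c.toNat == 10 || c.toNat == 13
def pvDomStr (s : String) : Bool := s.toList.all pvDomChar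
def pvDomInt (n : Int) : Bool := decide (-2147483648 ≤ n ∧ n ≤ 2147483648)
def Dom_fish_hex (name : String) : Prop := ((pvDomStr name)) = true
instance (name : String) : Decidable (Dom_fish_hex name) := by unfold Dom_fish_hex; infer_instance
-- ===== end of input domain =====

-- B XORs each fixed hex value in at most once, when its letter's count in the lowered name is odd,
-- instead of XOR-ing once per character; an alternative decomposition of the same O(n) task.

-- ===== PORT A =====
-- the dict literal A builds at the top of the function
def hexValuesA : PySem.Dict Char Int :=
  (((((PySem.Dict.empty.insert 'a' 10).insert 'b' 11).insert 'c' 12).insert 'd' 13).insert 'e' 14).insert 'f' 15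

def fish_hex (name : String) : Int :=
  (PySem.Str.lower name).toList.foldl
    (fun result char =>
      if hexValuesA.contains char then PySem.Int.bxor result (hexValuesA.getD char 0)
      else result) 0

-- ===== PORT B =====
def fish_hex_alt (name : String) : Int :=
  let counts : PySem.Dict Char Int :=
    (PySem.Str.lower name).toList.foldl (fun d ch => d.insert ch (d.getD ch 0 + 1)) PySem.Dict.empty
  [('a', (10 : Int)), ('b', 11), ('c', 12), ('d', 13), ('e', 14), ('f', 15)].foldl
    (fun result lv =>
      if PySem.Int.mod (counts.getD lv.1 0) 2 = 1 then PySem.Int.bxor result lv.2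
      else result) 0

-- ===== PRECONDITION & SPEC =====
def Spec_fish_hex (name : String) (out : Int) : Prop := out = fish_hex_alt name
instance (name : String) (out : Int) : Decidable (Spec_fish_hex name out) := by unfold Spec_fish_hex; infer_instance

-- ===== CLAIM (what is proved, stated in full; the proofs are below) =====
def Claim_equal_fish_hex : Prop := ∀ (name : String), Dom_fish_hex name → Spec_fish_hex name (fish_hex name)

-- ===== LEMMAS AND PROOFS =====

-- per-character contribution of A's loop, as a Nat
def gHex (c : Char) : Nat :=
  if c = 'a' then 10 else if c = 'b' then 11 else if c = 'c' then 12
  else if c = 'd' then 13 else if c = 'e' then 14 else if c = 'f' then 15 else 0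

-- the common value, as a function of the six letter counts
def fPar (na nb nc nd ne nf : Nat) : Nat :=
  (if na % 2 = 1 then 10 else 0) ^^^ (if nb % 2 = 1 then 11 else 0) ^^^ (if nc % 2 = 1 then 12 else 0) ^^^ (if nd % 2 = 1 then 13 else 0) ^^^ (if ne % 2 = 1 then 14 else 0) ^^^ (if nf % 2 = 1 then 15 else 0)

theorem foldA_eq (l : List Char) (r : Nat) :
    l.foldl (fun result char =>
      if hexValuesA.contains char then PySem.Int.bxor result (hexValuesA.getD char 0)
      else result) (r : Int)
    = ((l.foldl (fun acc c => acc ^^^ gHex c) r : Nat) : Int) := by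
  induction l generalizing r with
  | nil => rfl
  | cons c l ih =>
    simp only [List.foldl_cons]
    by_cases ha : c = 'a'
    · subst ha
      rw [if_pos (show hexValuesA.contains 'a' = true from by decide),
        show hexValuesA.getD 'a' 0 = ((10 : Nat) : Int) from by decide,
        PySem.Int.bxor_natCast, ih]
      simp [gHex]
    ·
      by_cases hb : c = 'b'
      · subst hb
        rw [if_pos (show hexValuesA.contains 'b' = true from by decide),
          show hexValuesA.getD 'b' 0 = ((11 : Nat) : Int) from by decide,
          PySem.Int.bxor_natCast, ih]
        simp [gHex]
      ·
        by_cases hc : c = 'c'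
        · subst hc
          rw [if_pos (show hexValuesA.contains 'c' = true from by decide),
            show hexValuesA.getD 'c' 0 = ((12 : Nat) : Int) from by decide,
            PySem.Int.bxor_natCast, ih]
          simp [gHex]
        ·
          by_cases hd : c = 'd'
          · subst hd
            rw [if_pos (show hexValuesA.contains 'd' = true from by decide),
              show hexValuesA.getD 'd' 0 = ((13 : Nat) : Int) from by decide,
              PySem.Int.bxor_natCast, ih]
            simp [gHex]
          ·
            by_cases he : c = 'e'
            · subst he
              rw [if_pos (show hexValuesA.contains 'e' = true from by decide),
                show hexValuesA.getD 'e' 0 = ((14 : Nat) : Int) from by decide,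
                PySem.Int.bxor_natCast, ih]
              simp [gHex]
            ·
              by_cases hf : c = 'f'
              · subst hf
                rw [if_pos (show hexValuesA.contains 'f' = true from by decide),
                  show hexValuesA.getD 'f' 0 = ((15 : Nat) : Int) from by decide,
                  PySem.Int.bxor_natCast, ih]
                simp [gHex]
              ·
                rw [if_neg (by simp [hexValuesA, PySem.Dict.contains_insert, PySem.Dict.contains_empty, ha, hb, hc, hd, he, hf]), ih]
                simp [gHex, ha, hb, hc, hd, he, hf]

theorem foldN_shift (l : List Char) (a : Nat) :
    l.foldl (fun acc c => acc ^^^ gHex c) a = a ^^^ l.foldl (fun acc c => acc ^^^ gHex c) 0 := by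
  induction l generalizing a with
  | nil => simp
  | cons c l ih =>
    simp only [List.foldl_cons]
    rw [ih (a ^^^ gHex c), ih (0 ^^^ gHex c), Nat.zero_xor, Nat.xor_assoc]

theorem flip_if (n v : Nat) :
    (if (n + 1) % 2 = 1 then v else 0) = v ^^^ (if n % 2 = 1 then v else 0) := by
  rcases Nat.mod_two_eq_zero_or_one n with h | h <;> simp [Nat.add_mod, h]

theorem foldN_counts (l : List Char) :
    l.foldl (fun acc c => acc ^^^ gHex c) 0
    = fPar (l.count 'a') (l.count 'b') (l.count 'c') (l.count 'd') (l.count 'e') (l.count 'f') := by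
  induction l with
  | nil => simp [fPar]
  | cons c l ih =>
    simp only [List.foldl_cons, Nat.zero_xor]
    rw [foldN_shift, ih]
    simp only [List.count_cons]
    by_cases ha : c = 'a'
    · subst ha
      simp only [fPar, gHex, beq_iff_eq, reduceIte, flip_if]
      simp [Nat.xor_assoc]
    ·
      by_cases hb : c = 'b'
      · subst hb
        simp only [fPar, gHex, beq_iff_eq, reduceIte, flip_if]
        simp [Nat.xor_assoc, Nat.xor_left_comm]
      ·
        by_cases hc : c = 'c'
        · subst hc
          simp only [fPar, gHex, beq_iff_eq, reduceIte, flip_if]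
          simp [Nat.xor_assoc, Nat.xor_left_comm]
        ·
          by_cases hd : c = 'd'
          · subst hd
            simp only [fPar, gHex, beq_iff_eq, reduceIte, flip_if]
            simp [Nat.xor_assoc, Nat.xor_left_comm]
          ·
            by_cases he : c = 'e'
            · subst he
              simp only [fPar, gHex, beq_iff_eq, reduceIte, flip_if]
              simp [Nat.xor_assoc, Nat.xor_left_comm]
            ·
              by_cases hf : c = 'f'
              · subst hf
                simp only [fPar, gHex, beq_iff_eq, reduceIte, flip_if]
                simp [Nat.xor_assoc, Nat.xor_left_comm]
              ·
                have hg : gHex c = 0 := by simp [gHex, ha, hb, hc, hd, he, hf]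
                simp [fPar, hg, beq_iff_eq, ha, hb, hc, hd, he, hf]

theorem altB_counts (name : String) :
    fish_hex_alt name
    = ((fPar ((PySem.Str.lower name).toList.count 'a') ((PySem.Str.lower name).toList.count 'b')
        ((PySem.Str.lower name).toList.count 'c') ((PySem.Str.lower name).toList.count 'd')
        ((PySem.Str.lower name).toList.count 'e') ((PySem.Str.lower name).toList.count 'f') : Nat) : Int) := by
  have hcond : ∀ n : Nat, (PySem.Int.mod (PySem.Dict.empty.getD ' ' (0 : Int) + (n : Int)) 2 = 1) ↔ n % 2 = 1 := by
    intro n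
    rw [PySem.Dict.getD_empty, zero_add, show (2 : Int) = ((2 : Nat) : Int) from rfl,
      PySem.Int.mod_natCast]
    omega
  simp only [fish_hex_alt, List.foldl_cons, List.foldl_nil,
    PySem.Dict.getD_foldl_insert_add_one, PySem.Dict.getD_empty, zero_add]
  have hcond2 : ∀ n : Nat, (PySem.Int.mod ((n : Int)) 2 = 1) ↔ n % 2 = 1 := by
    intro n
    rw [show (2 : Int) = ((2 : Nat) : Int) from rfl, PySem.Int.mod_natCast]
    omega
  simp only [hcond2, fPar]
  split_ifs <;> decide

-- ===== VERDICT (by name: the statement is the Claim_ definition above) =====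
theorem fish_hex_spec : Claim_equal_fish_hex := by
  intro name _
  unfold Spec_fish_hex fish_hex
  have h := foldA_eq (PySem.Str.lower name).toList 0
  simp only [Nat.cast_zero] at h
  rw [h, foldN_counts, altB_counts]
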